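-- pv_equiv track=rewrite | github.com/Braykoff/Python-SHA-256 | hash.py | andAddBinary
-- ===== SOURCE A (Python) =====
-- def andAddBinary(binary):
-- 	final = "1"*len(binary[0])
--
-- 	for b in binary:
-- 		l = list(final)
-- 		for x in range(0, len(b)):
-- 			if b[x] == "0":
-- 				l[x] = "0"
-- 		final = "".join(l)
--
-- 	return final
-- ===== SOURCE B (Python) =====
-- def andAddBinary(binary):
-- 	n = len(binary[0])
-- 	return "".join(
-- 		"0" if any(x < len(b) and b[x] == "0" for b in binary) else "1"
-- 		for x in range(n)
-- 	)
-- ===== Notes on version B (the rewrite author's own statement) =====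
-- stated objective: idiomatic
-- what changed: B builds the result column by column (for each index, '0' iff some string has '0' there) with a join over a generator, instead of A's outer loop that repeatedly rewrites a running result list.
import Mathlib
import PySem

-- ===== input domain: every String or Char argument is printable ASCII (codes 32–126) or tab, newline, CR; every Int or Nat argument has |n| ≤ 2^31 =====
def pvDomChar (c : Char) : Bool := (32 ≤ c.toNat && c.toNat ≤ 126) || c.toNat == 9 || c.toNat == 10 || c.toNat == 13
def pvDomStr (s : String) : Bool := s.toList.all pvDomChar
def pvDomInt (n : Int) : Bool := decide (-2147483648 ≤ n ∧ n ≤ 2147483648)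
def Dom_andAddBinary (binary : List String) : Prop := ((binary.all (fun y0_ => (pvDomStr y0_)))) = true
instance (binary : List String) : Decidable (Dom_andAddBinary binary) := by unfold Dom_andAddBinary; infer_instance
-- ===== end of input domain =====

-- B builds the result column by column instead of A's outer loop rewriting a running list; same O(n*m) cost, more idiomatic.


-- ===== PORT A =====
-- inner loop: for x in range(0, len(b)): if b[x] == "0": l[x] = "0"
-- (on Pre_ inputs every executed l[x] = "0" has x < len l, so List.set is exact)
def andAddBinaryGo (l : List Char) (b : List Char) : List Char :=
  (List.range b.length).foldl (fun l x => if b.getD x ' ' = '0' then l.set x '0' else l) l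

def andAddBinary (binary : List String) : String :=
  let final := List.replicate ((PySem.List.pyGet? binary 0).getD "").toList.length '1'
  String.mk (binary.foldl (fun f b => andAddBinaryGo f b.toList) final)

-- ===== PORT B =====
def andAddBinary_alt (binary : List String) : String :=
  let n := ((PySem.List.pyGet? binary 0).getD "").toList.length
  String.mk ((List.range n).map (fun x =>
    if binary.any (fun b => decide (x < b.toList.length) && (b.toList.getD x ' ' == '0'))
    then '0' else '1'))

-- ===== PRECONDITION & SPEC =====
-- Pre_ excludes exactly the inputs where Python A raises: the empty list (binary[0] → IndexError)
-- and lists where some string has '0' at an index ≥ len(binary[0]) (l[x] → IndexError).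
def Pre_andAddBinary (binary : List String) : Prop :=
  binary ≠ [] ∧ ∀ b ∈ binary, ∀ x, x < b.toList.length → b.toList.getD x ' ' = '0' →
    x < (binary.headD "").toList.length
instance (binary : List String) : Decidable (Pre_andAddBinary binary) := by
  unfold Pre_andAddBinary; infer_instance

def pvWitness_andAddBinary : List String := ["10", "11"]

def Spec_andAddBinary (binary : List String) (out : String) : Prop := out = andAddBinary_alt binary
instance (binary : List String) (out : String) : Decidable (Spec_andAddBinary binary out) := by unfold Spec_andAddBinary; infer_instance

-- ===== CLAIM (what is proved, stated in full; the proofs are below) =====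
def Claim_equal_andAddBinary : Prop := ∀ (binary : List String), Dom_andAddBinary binary → Pre_andAddBinary binary → Spec_andAddBinary binary (andAddBinary binary)

-- ===== LEMMAS AND PROOFS =====

theorem getD_set_ne (l : List Char) (y x : Nat) (a : Char) (h : y ≠ x) :
    (l.set y a).getD x ' ' = l.getD x ' ' := by
  simp [List.getD_eq_getElem?_getD, h]

theorem getD_set_self (l : List Char) (x : Nat) (a : Char) (hx : x < l.length) :
    (l.set x a).getD x ' ' = a := by
  simp [List.getD_eq_getElem?_getD, hx]

theorem go_length (b : List Char) (xs : List Nat) (l : List Char) :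
    (xs.foldl (fun l x => if b.getD x ' ' = '0' then l.set x '0' else l) l).length = l.length := by
  induction xs generalizing l with
  | nil => rfl
  | cons y ys ih => rw [List.foldl_cons, ih]; split <;> simp

theorem go_getD (b : List Char) (xs : List Nat) (l : List Char) (x : Nat) (hx : x < l.length) :
    (xs.foldl (fun l x => if b.getD x ' ' = '0' then l.set x '0' else l) l).getD x ' '
      = if x ∈ xs ∧ b.getD x ' ' = '0' then '0' else l.getD x ' ' := by
  induction xs generalizing l with
  | nil => simp
  | cons y ys ih =>
    have hlen : (if b.getD y ' ' = '0' then l.set y '0' else l).length = l.length := by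
      split <;> simp
    rw [List.foldl_cons, ih _ (hlen ▸ hx)]
    by_cases cy : b.getD y ' ' = '0'
    · rw [if_pos cy]
      by_cases cx : b.getD x ' ' = '0'
      · by_cases hmem : x ∈ ys
        · rw [if_pos (show x ∈ ys ∧ b.getD x ' ' = '0' from ⟨hmem, cx⟩),
            if_pos (show x ∈ y :: ys ∧ b.getD x ' ' = '0' from
              ⟨List.mem_cons_of_mem y hmem, cx⟩)]
        · rw [if_neg (show ¬(x ∈ ys ∧ b.getD x ' ' = '0') from fun h => hmem h.1)]
          by_cases hxy : x = y
          · subst hxy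
            rw [getD_set_self l x '0' hx,
              if_pos (show x ∈ x :: ys ∧ b.getD x ' ' = '0' from ⟨List.mem_cons_self, cx⟩)]
          · rw [if_neg (show ¬(x ∈ y :: ys ∧ b.getD x ' ' = '0') from
              fun h => (List.mem_cons.mp h.1).elim hxy hmem)]
            exact getD_set_ne l y x '0' (fun h => hxy h.symm)
      · rw [if_neg (show ¬(x ∈ ys ∧ b.getD x ' ' = '0') from fun h => cx h.2),
          if_neg (show ¬(x ∈ y :: ys ∧ b.getD x ' ' = '0') from fun h => cx h.2)]
        exact getD_set_ne l y x '0' (fun h => cx (h ▸ cy))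
    · rw [if_neg cy]
      by_cases cx : b.getD x ' ' = '0'
      · by_cases hmem : x ∈ ys
        · rw [if_pos (show x ∈ ys ∧ b.getD x ' ' = '0' from ⟨hmem, cx⟩),
            if_pos (show x ∈ y :: ys ∧ b.getD x ' ' = '0' from
              ⟨List.mem_cons_of_mem y hmem, cx⟩)]
        · have hxy : ¬x = y := fun h => cy (h ▸ cx)
          rw [if_neg (show ¬(x ∈ ys ∧ b.getD x ' ' = '0') from fun h => hmem h.1),
            if_neg (show ¬(x ∈ y :: ys ∧ b.getD x ' ' = '0') from
              fun h => (List.mem_cons.mp h.1).elim hxy hmem)]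
      · rw [if_neg (show ¬(x ∈ ys ∧ b.getD x ' ' = '0') from fun h => cx h.2),
          if_neg (show ¬(x ∈ y :: ys ∧ b.getD x ' ' = '0') from fun h => cx h.2)]

theorem fold_length (bs : List String) (l : List Char) :
    (bs.foldl (fun f b => andAddBinaryGo f b.toList) l).length = l.length := by
  induction bs generalizing l with
  | nil => rfl
  | cons b bs ih => rw [List.foldl_cons, ih, andAddBinaryGo, go_length]

theorem fold_getD (bs : List String) (l : List Char) (x : Nat) (hx : x < l.length) :
    (bs.foldl (fun f b => andAddBinaryGo f b.toList) l).getD x ' '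
      = if ∃ b ∈ bs, x < b.toList.length ∧ b.toList.getD x ' ' = '0' then '0'
        else l.getD x ' ' := by
  induction bs generalizing l with
  | nil => simp
  | cons b bs ih =>
    have hlen : (andAddBinaryGo l b.toList).length = l.length := by
      rw [andAddBinaryGo, go_length]
    rw [List.foldl_cons, ih _ (hlen ▸ hx), andAddBinaryGo, go_getD _ _ _ _ hx]
    by_cases h1 : ∃ c ∈ bs, x < c.toList.length ∧ c.toList.getD x ' ' = '0'
    · obtain ⟨c, hc, h⟩ := h1
      rw [if_pos ⟨c, hc, h⟩, if_pos ⟨c, List.mem_cons_of_mem b hc, h⟩]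
    · rw [if_neg h1]
      by_cases h2 : x < b.toList.length ∧ b.toList.getD x ' ' = '0'
      · rw [if_pos ⟨List.mem_range.mpr h2.1, h2.2⟩,
          if_pos ⟨b, List.mem_cons_self, h2⟩]
      · rw [if_neg (fun h => h2 ⟨List.mem_range.mp h.1, h.2⟩),
          if_neg ?_]
        rintro ⟨c, hc, h⟩
        rcases List.mem_cons.mp hc with rfl | hc
        · exact h2 h
        · exact h1 ⟨c, hc, h⟩

theorem andAddBinary_eq_alt (binary : List String) :
    andAddBinary binary = andAddBinary_alt binary := by
  rw [andAddBinary, andAddBinary_alt]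
  set n := ((PySem.List.pyGet? binary 0).getD "").toList.length with hn
  apply congrArg String.mk
  apply List.ext_getElem
  · rw [fold_length, List.length_replicate, List.length_map, List.length_range]
  · intro i h1 h2
    have hi : i < n := by simpa using h2
    have hrep : i < (List.replicate n '1').length := by simpa using hi
    have hgd := fold_getD binary (List.replicate n '1') i hrep
    rw [List.getD_eq_getElem _ _ h1] at hgd
    rw [hgd, List.getElem_map, List.getElem_range, List.getD_replicate _ hi]
    by_cases h : ∃ b ∈ binary, i < b.toList.length ∧ b.toList.getD i ' ' = '0'
    · rw [if_pos h, if_pos ?_]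
      obtain ⟨b, hb, h⟩ := h
      refine List.any_eq_true.mpr ⟨b, hb, ?_⟩
      simp only [Bool.and_eq_true, decide_eq_true_eq, beq_iff_eq]
      exact ⟨h.1, h.2⟩
    · rw [if_neg h, if_neg ?_]
      intro hany
      obtain ⟨b, hb, hcond⟩ := List.any_eq_true.mp hany
      rcases Bool.and_eq_true .. |>.mp hcond with ⟨hlt, heq⟩
      exact h ⟨b, hb, of_decide_eq_true hlt, beq_iff_eq.mp heq⟩

-- ===== VERDICT (by name: the statement is the Claim_ definition above) =====
theorem andAddBinary_spec : Claim_equal_andAddBinary := by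
  intro binary _ _
  unfold Spec_andAddBinary
  exact andAddBinary_eq_alt binary
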